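-- pv_equiv track=rewrite | github.com/ghareth/bibulous | bibulous_tools.py | get_variable_name_elements
-- ===== SOURCE A (Python) =====
-- def get_variable_name_elements(variable):
--     '''
--     Split the variable name into "name" (left-hand-side part), "iterator" (middle part), and "remainder" (the right-
--     hand-side part).
--
--     With these three elements, we will know how to build a template variable inside the implicit loop.
--
--     Parameters
--     ----------
--     variable : str
--         The variable name to be parsed.
--
--     Returns
--     -------
--     var_dict : dict
--         The dictionary containing elements of the variable name, with keys 'varname', 'prefix', 'index', and 'suffix'. \
--         The input variable can be reconstructed with name + '.' + prefix + index + suffix.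
--     '''
--
--     varlist = variable.split('.')
--     var_dict = {}
--     var_dict['name'] = varlist[0]
--     var_dict['index'] = ''
--     var_dict['prefix'] = ''
--     var_dict['suffix'] = ''
--
--     for i,piece in enumerate(varlist[1:]):
--         if piece.isdigit() or (piece == 'n') or (piece == 'N'):
--             var_dict['index'] = piece
--         elif (var_dict['index'] == ''):
--             var_dict['prefix'] += piece + '.'
--         else:
--             var_dict['suffix'] += '.' + piece
--
--     return(var_dict)
-- ===== SOURCE B (Python) =====
-- def get_variable_name_elements(variable):
--     name, *pieces = variable.split('.')
--
--     def is_index(piece):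
--         return piece.isdigit() or piece in ('n', 'N')
--
--     for k, piece in enumerate(pieces):
--         if is_index(piece):
--             return {'name': name,
--                     'index': piece,
--                     'prefix': ''.join(p + '.' for p in pieces[:k]),
--                     'suffix': ''.join('.' + p for p in pieces[k + 1:])}
--     return {'name': name, 'index': '',
--             'prefix': ''.join(p + '.' for p in pieces), 'suffix': ''}
-- ===== Notes on version B (the rewrite author's own statement) =====
-- stated objective: simpler
-- what changed: B replaces A's stateful three-accumulator dict loop by a single find-first scan with an early return: locate the first index-like piece (digits, 'n' or 'N') and slice prefix/suffix around it; Pre_ excludes variables whose dotted tail contains more than one index-like piece, an unspecified corner where A's last-one-wins accumulation and B's split-at-first are both defensible.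
import Mathlib
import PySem

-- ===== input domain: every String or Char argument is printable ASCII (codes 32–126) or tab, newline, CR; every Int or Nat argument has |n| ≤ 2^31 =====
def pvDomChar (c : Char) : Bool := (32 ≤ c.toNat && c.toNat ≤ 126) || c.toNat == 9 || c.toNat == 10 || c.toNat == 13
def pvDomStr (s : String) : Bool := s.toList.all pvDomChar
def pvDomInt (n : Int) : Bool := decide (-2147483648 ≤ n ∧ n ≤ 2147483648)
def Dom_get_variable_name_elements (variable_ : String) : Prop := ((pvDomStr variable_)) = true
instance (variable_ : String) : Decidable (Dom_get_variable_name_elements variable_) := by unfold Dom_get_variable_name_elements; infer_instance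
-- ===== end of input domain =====

-- B replaces A's stateful three-accumulator loop by finding the first index-like piece and
-- slicing prefix/suffix around it (objective: simpler decomposition, same cost).

-- ===== PORT A =====
-- var_dict['index'] etc. always exist when read, so Dict.getD's default never fires (exact).
-- varlist[0]: str.split always returns a non-empty list, so the .getD "" defaults never fire (exact).
def get_variable_name_elements (variable_ : String) : List (String × String) :=
  let varlist := (PySem.Str.split? variable_ ".").getD []
  let d : PySem.Dict String String := PySem.Dict.empty
  let d := d.insert "name" ((PySem.List.pyGet? varlist 0).getD "")
  let d := d.insert "index" ""
  let d := d.insert "prefix" ""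
  let d := d.insert "suffix" ""
  let d := (PySem.List.enumerate (varlist.drop 1)).foldl (fun d ip =>
      let piece := ip.2
      if PySem.Str.strIsdigit piece || piece == "n" || piece == "N" then
        d.insert "index" piece
      else if d.getD "index" "" == "" then
        d.insert "prefix" (d.getD "prefix" "" ++ (piece ++ "."))
      else
        d.insert "suffix" (d.getD "suffix" "" ++ ("." ++ piece))) d
  d.items

-- ===== PORT B =====
-- is_index from Source B
def pvSpecial (p : String) : Bool :=
  PySem.Str.strIsdigit p || p == "n" || p == "N"

-- the 'for k, piece in enumerate(pieces): if is_index(piece): return …' early-return scan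
def pvFindIndex : List String → Nat → Option (Nat × String)
  | [], _ => none
  | piece :: rest, k => if pvSpecial piece then some (k, piece) else pvFindIndex rest (k + 1)

-- pieces[:k] / pieces[k+1:] with 0 ≤ k < len(pieces) are exactly take k / drop (k+1).
def get_variable_name_elements_alt (variable_ : String) : List (String × String) :=
  let varlist := (PySem.Str.split? variable_ ".").getD []
  let name := (PySem.List.pyGet? varlist 0).getD ""
  let pieces := varlist.drop 1
  match pvFindIndex pieces 0 with
  | some (k, piece) =>
      [("name", name), ("index", piece),
       ("prefix", PySem.Str.join "" ((pieces.take k).map (· ++ "."))),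
       ("suffix", PySem.Str.join "" ((pieces.drop (k + 1)).map ("." ++ ·)))]
  | none =>
      [("name", name), ("index", ""),
       ("prefix", PySem.Str.join "" (pieces.map (· ++ "."))),
       ("suffix", "")]

-- ===== PRECONDITION & SPEC =====
-- Pre_ excludes variables whose dotted tail contains more than one index-like piece (a digit
-- string, 'n' or 'N'): an unspecified corner where A's value (the LAST such piece becomes the
-- index, the earlier ones are silently dropped) and B's value (split at the FIRST such piece)
-- are both defensible; A still returns there, so these inputs are cited in claim.json.
def Pre_get_variable_name_elements (variable_ : String) : Prop :=
  (((PySem.Str.split? variable_ ".").getD []).drop 1).countP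
    (fun p => PySem.Str.strIsdigit p || p == "n" || p == "N") ≤ 1
instance (variable_ : String) : Decidable (Pre_get_variable_name_elements variable_) := by unfold Pre_get_variable_name_elements; infer_instance
def pvWitness_get_variable_name_elements : String := "citation.b.1.c"

def Spec_get_variable_name_elements (variable_ : String) (out : List (String × String)) : Prop := out = get_variable_name_elements_alt variable_
instance (variable_ : String) (out : List (String × String)) : Decidable (Spec_get_variable_name_elements variable_ out) := by unfold Spec_get_variable_name_elements; infer_instance

-- ===== CLAIM (what is proved, stated in full; the proofs are below) =====
def Claim_equal_get_variable_name_elements : Prop := ∀ (variable_ : String), Dom_get_variable_name_elements variable_ → Pre_get_variable_name_elements variable_ → Spec_get_variable_name_elements variable_ (get_variable_name_elements variable_)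

-- ===== LEMMAS AND PROOFS =====

-- the state of A's loop: the dict always has exactly these four keys in this order
def pvD (n i p s : String) : PySem.Dict String String :=
  PySem.Dict.mk [("name", n), ("index", i), ("prefix", p), ("suffix", s)]

-- A's loop body, on the dict state
def pvStep (d : PySem.Dict String String) (piece : String) : PySem.Dict String String :=
  if PySem.Str.strIsdigit piece || piece == "n" || piece == "N" then d.insert "index" piece
  else if d.getD "index" "" == "" then d.insert "prefix" (d.getD "prefix" "" ++ (piece ++ "."))
  else d.insert "suffix" (d.getD "suffix" "" ++ ("." ++ piece))

theorem pvFoldlEnum (l : List String) (d : PySem.Dict String String) :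
    (PySem.List.enumerate l).foldl (fun d ip =>
      let piece := ip.2
      if PySem.Str.strIsdigit piece || piece == "n" || piece == "N" then
        d.insert "index" piece
      else if d.getD "index" "" == "" then
        d.insert "prefix" (d.getD "prefix" "" ++ (piece ++ "."))
      else
        d.insert "suffix" (d.getD "suffix" "" ++ ("." ++ piece))) d
    = l.foldl pvStep d := by
  conv_rhs => rw [← PySem.List.map_snd_enumerate l 0, List.foldl_map]
  rfl

theorem pvStep_special (n i p s q : String) (hq : pvSpecial q = true) :
    pvStep (pvD n i p s) q = pvD n q p s := by
  simp [pvSpecial] at hq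
  simp [pvStep, pvD, PySem.Dict.insert, PySem.Dict.contains, hq]

theorem pvStep_prefix (n p s q : String) (hq : pvSpecial q = false) :
    pvStep (pvD n "" p s) q = pvD n "" (p ++ (q ++ ".")) s := by
  simp [pvSpecial] at hq
  simp [pvStep, pvD, PySem.Dict.insert, PySem.Dict.getD, PySem.Dict.get?, PySem.Dict.contains, hq]

theorem pvStep_suffix (n i p s q : String) (hq : pvSpecial q = false) (hi : i ≠ "") :
    pvStep (pvD n i p s) q = pvD n i p (s ++ ("." ++ q)) := by
  simp [pvSpecial] at hq
  simp [pvStep, pvD, PySem.Dict.insert, PySem.Dict.getD, PySem.Dict.get?, PySem.Dict.contains, hq, hi]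

theorem pvSpecial_ne_empty (q : String) (hq : pvSpecial q = true) : q ≠ "" := by
  rintro rfl
  exact absurd hq (by decide)

theorem pvJoin_empty_cons (x : List Char) (t : List (List Char)) :
    PySem.Chars.join [] (x :: t) = x ++ PySem.Chars.join [] t := by
  cases t with
  | nil => simp [PySem.Chars.join_singleton, PySem.Chars.join_nil]
  | cons y r => rw [PySem.Chars.join_cons_cons]; simp

theorem pvJoinP_cons (x : String) (t : List String) :
    PySem.Str.join "" ((x :: t).map (· ++ ".")) = (x ++ ".") ++ PySem.Str.join "" (t.map (· ++ ".")) := by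
  rw [← String.toList_inj]
  simp [PySem.Str.toList_join, pvJoin_empty_cons, String.toList_append]

theorem pvJoinS_cons (x : String) (t : List String) :
    PySem.Str.join "" ((x :: t).map ("." ++ ·)) = ("." ++ x) ++ PySem.Str.join "" (t.map ("." ++ ·)) := by
  rw [← String.toList_inj]
  simp [PySem.Str.toList_join, pvJoin_empty_cons, String.toList_append]

theorem pvPhase1 (l : List String) (n p : String) (h : ∀ q ∈ l, pvSpecial q = false) :
    l.foldl pvStep (pvD n "" p "") = pvD n "" (p ++ PySem.Str.join "" (l.map (· ++ "."))) "" := by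
  induction l generalizing p with
  | nil => simp [PySem.Str.join, PySem.Chars.join_nil]
  | cons x t ih =>
      have hx := h x (by simp)
      rw [List.foldl_cons, pvStep_prefix n p "" x hx,
          ih (p ++ (x ++ ".")) (fun q hq => h q (by simp [hq])), pvJoinP_cons,
          String.append_assoc]

theorem pvPhase2 (l : List String) (n i p s : String) (hi : i ≠ "")
    (h : ∀ q ∈ l, pvSpecial q = false) :
    l.foldl pvStep (pvD n i p s) = pvD n i p (s ++ PySem.Str.join "" (l.map ("." ++ ·))) := by
  induction l generalizing s with
  | nil => simp [PySem.Str.join, PySem.Chars.join_nil]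
  | cons x t ih =>
      have hx := h x (by simp)
      rw [List.foldl_cons, pvStep_suffix n i p s x hx hi,
          ih (s ++ ("." ++ x)) (fun q hq => h q (by simp [hq])), pvJoinS_cons,
          String.append_assoc]

theorem pvFindIndex_shift (l : List String) (s : Nat) :
    pvFindIndex l s = (pvFindIndex l 0).map (fun p => (p.1 + s, p.2)) := by
  induction l generalizing s with
  | nil => rfl
  | cons x t ih =>
      by_cases hx : pvSpecial x = true
      · simp [pvFindIndex, hx]
      · simp only [pvFindIndex, hx, if_neg, Bool.not_eq_true] at *
        rw [ih (s + 1), ih 1, Option.map_map]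
        cases pvFindIndex t 0 <;> simp
        omega

theorem pvFindIndex_none (l : List String) (h : pvFindIndex l 0 = none) :
    ∀ q ∈ l, pvSpecial q = false := by
  induction l with
  | nil => simp
  | cons x t ih =>
      by_cases hx : pvSpecial x = true
      · simp [pvFindIndex, hx] at h
      · simp only [pvFindIndex, hx, if_neg, Bool.not_eq_true] at h ⊢
        rw [pvFindIndex_shift t 1] at h
        simp at h
        intro q hq
        rcases List.mem_cons.mp hq with rfl | hq'
        · simpa using hx
        · exact ih h q hq' 

theorem pvFindIndex_some (l : List String) (k : Nat) (q : String)
    (h : pvFindIndex l 0 = some (k, q)) :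
    (∀ x ∈ l.take k, pvSpecial x = false) ∧ pvSpecial q = true ∧
      l = l.take k ++ q :: l.drop (k + 1) := by
  induction l generalizing k with
  | nil => simp [pvFindIndex] at h
  | cons x t ih =>
      by_cases hx : pvSpecial x = true
      · simp [pvFindIndex, hx] at h
        obtain ⟨rfl, rfl⟩ := h
        simp [hx]
      · simp only [pvFindIndex, hx, if_neg, Bool.not_eq_true] at h
        rw [pvFindIndex_shift t 1] at h
        cases hf : pvFindIndex t 0 with
        | none => rw [hf] at h; simp at h
        | some p =>
            rw [hf] at h
            simp at h
            obtain ⟨hk, rfl⟩ := h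
            obtain ⟨h1, h2, h3⟩ := ih p.1 (by rw [hf])
            subst hk
            refine ⟨?_, h2, ?_⟩
            · intro y hy
              rw [List.take_succ_cons] at hy
              rcases List.mem_cons.mp hy with rfl | hy
              · simpa using hx
              · exact h1 y hy
            · rw [List.take_succ_cons, List.drop_succ_cons]
              exact congrArg (x :: ·) h3

theorem pvMain (pieces : List String) (n : String)
    (h : pieces.countP pvSpecial ≤ 1) :
    (pieces.foldl pvStep (pvD n "" "" "")).items =
      match pvFindIndex pieces 0 with
      | some (k, q) =>
          [("name", n), ("index", q),
           ("prefix", PySem.Str.join "" ((pieces.take k).map (· ++ "."))),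
           ("suffix", PySem.Str.join "" ((pieces.drop (k + 1)).map ("." ++ ·)))]
      | none =>
          [("name", n), ("index", ""),
           ("prefix", PySem.Str.join "" (pieces.map (· ++ "."))),
           ("suffix", "")] := by
  cases hf : pvFindIndex pieces 0 with
  | none =>
      rw [pvPhase1 pieces n "" (pvFindIndex_none pieces hf), String.empty_append]
      rfl
  | some kq =>
      obtain ⟨k, q⟩ := kq
      obtain ⟨h1, h2, h3⟩ := pvFindIndex_some pieces k q hf
      have hdr : ∀ x ∈ pieces.drop (k + 1), pvSpecial x = false := by
        rw [h3, List.countP_append, List.countP_cons] at h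
        simp [h2] at h
        intro x hx
        have h0 := List.countP_eq_zero.mp
          (by omega : (pieces.drop (k + 1)).countP pvSpecial = 0)
        simpa using h0 x hx
      conv_lhs => rw [h3]
      rw [List.foldl_append, pvPhase1 (pieces.take k) n "" h1, String.empty_append,
          List.foldl_cons, pvStep_special _ _ _ _ _ h2,
          pvPhase2 _ n q _ "" (pvSpecial_ne_empty q h2) hdr, String.empty_append]
      rfl

-- ===== VERDICT (by name: the statement is the Claim_ definition above) =====
theorem get_variable_name_elements_spec : Claim_equal_get_variable_name_elements := by
  intro v _ hpre
  unfold Pre_get_variable_name_elements at hpre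
  rw [show (fun p => PySem.Str.strIsdigit p || p == "n" || p == "N") = pvSpecial from rfl] at hpre
  show get_variable_name_elements v = get_variable_name_elements_alt v
  exact (congrArg PySem.Dict.items
      (pvFoldlEnum (((PySem.Str.split? v ".").getD []).drop 1)
        (pvD ((PySem.List.pyGet? ((PySem.Str.split? v ".").getD []) 0).getD "") "" "" ""))).trans
    (pvMain (((PySem.Str.split? v ".").getD []).drop 1)
      ((PySem.List.pyGet? ((PySem.Str.split? v ".").getD []) 0).getD "") hpre)
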